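-- pv_equiv track=rewrite | github.com/sthibaul/pythontutor | v3/bibV3.py | _triangle
-- ===== SOURCE A (Python) =====
-- def _triangle (n):
--     lignes = []
--     debut = 0
--     for i in range (n):
--         fin = debut + i + 1
--         u = list (range (debut, fin))
--         lignes.append (u)
--         debut = fin
--     debut = -1
--     for i in range (n - 1):
--         u = []
--         debut = debut + i + 1
--         k = debut
--         for j in range (i, n):
--             u.append (k)
--             k = k + j + 1
--         lignes.append (u)
--     debut = 0
--     for i in range (n - 1):
--         u = []
--         debut = debut + i
--         k = debut
--         for j in range (i, n):
--             u.append (k)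
--             k = k + j + 2
--         lignes.append (u)
--     return lignes
-- ===== SOURCE B (Python) =====
-- def _triangle(n):
--     # build the triangular grid once; rows then column-diagonals then anti-diagonals
--     grid = []
--     for r in range(n):
--         start = r * (r + 1) // 2
--         grid.append(list(range(start, start + r + 1)))
--     out = list(grid)
--     for c in range(n - 1):
--         out.append([grid[r][c] for r in range(c, n)])
--     for d in range(n - 1):
--         out.append([grid[r][r - d] for r in range(d, n)])
--     return out
-- ===== Notes on version B (the rewrite author's own statement) =====
-- stated objective: simpler
-- what changed: B builds the triangular grid once (rows via the closed-form start r*(r+1)//2) and then emits both diagonal families by indexing the prebuilt 2D table (column slices and anti-diagonals), instead of A's re-derivation of every diagonal as a separate arithmetic progression with hand-threaded running offsets.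
import Mathlib
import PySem

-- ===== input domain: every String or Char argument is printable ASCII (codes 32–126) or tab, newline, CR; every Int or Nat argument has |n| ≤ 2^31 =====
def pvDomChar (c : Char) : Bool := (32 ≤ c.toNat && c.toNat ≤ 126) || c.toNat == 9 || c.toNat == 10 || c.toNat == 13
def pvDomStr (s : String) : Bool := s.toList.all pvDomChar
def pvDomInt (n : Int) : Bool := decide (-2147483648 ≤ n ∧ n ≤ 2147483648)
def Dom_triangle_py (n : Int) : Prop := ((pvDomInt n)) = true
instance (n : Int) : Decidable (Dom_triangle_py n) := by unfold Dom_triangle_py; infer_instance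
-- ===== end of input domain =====

-- B builds the triangular grid once and reads both diagonal families off it by indexing,
-- instead of recomputing each diagonal as an arithmetic progression (objective: simpler).

-- ===== PORT A =====
def triangle_py (n : Int) : List (List Int) :=
  -- first loop: rows, state (lignes, debut)
  let s1 := (PySem.List.pyRange 0 n 1).foldl
      (fun (st : List (List Int) × Int) i =>
        let fin := st.2 + i + 1
        (st.1 ++ [PySem.List.pyRange st.2 fin 1], fin)) ([], 0)
  -- second loop: left diagonals, state (lignes, debut) starting at -1
  let s2 := (PySem.List.pyRange 0 (n - 1) 1).foldl
      (fun (st : List (List Int) × Int) i =>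
        let debut := st.2 + i + 1
        let inner := (PySem.List.pyRange i n 1).foldl
            (fun (p : List Int × Int) j => (p.1 ++ [p.2], p.2 + j + 1)) ([], debut)
        (st.1 ++ [inner.1], debut)) (s1.1, -1)
  -- third loop: right diagonals, state (lignes, debut) starting at 0
  let s3 := (PySem.List.pyRange 0 (n - 1) 1).foldl
      (fun (st : List (List Int) × Int) i =>
        let debut := st.2 + i
        let inner := (PySem.List.pyRange i n 1).foldl
            (fun (p : List Int × Int) j => (p.1 ++ [p.2], p.2 + j + 2)) ([], debut)
        (st.1 ++ [inner.1], debut)) (s2.1, 0)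
  s3.1

-- ===== PORT B =====
def triangle_py_alt (n : Int) : List (List Int) :=
  -- grid[r] = list(range(start, start + r + 1)) with start = r*(r+1)//2
  let grid := (PySem.List.pyRange 0 n 1).foldl
      (fun (g : List (List Int)) r =>
        let start := PySem.Int.floordiv (r * (r + 1)) 2
        g ++ [PySem.List.pyRange start (start + r + 1) 1]) []
  -- out = list(grid); append column diagonals, then anti-diagonals, by indexing grid
  let out1 := (PySem.List.pyRange 0 (n - 1) 1).foldl
      (fun (out : List (List Int)) c =>
        out ++ [(PySem.List.pyRange c n 1).map
                  (fun r => PySem.List.pyGetD (PySem.List.pyGetD grid r []) c 0)]) grid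
  (PySem.List.pyRange 0 (n - 1) 1).foldl
      (fun (out : List (List Int)) d =>
        out ++ [(PySem.List.pyRange d n 1).map
                  (fun r => PySem.List.pyGetD (PySem.List.pyGetD grid r []) (r - d) 0)]) out1

-- ===== PRECONDITION & SPEC =====
def Spec_triangle_py (n : Int) (out : List (List Int)) : Prop := out = triangle_py_alt n
instance (n : Int) (out : List (List Int)) : Decidable (Spec_triangle_py n out) := by unfold Spec_triangle_py; infer_instance

-- ===== CLAIM (what is proved, stated in full; the proofs are below) =====
def Claim_equal_triangle_py : Prop := ∀ (n : Int), Dom_triangle_py n → Spec_triangle_py n (triangle_py n)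

-- ===== LEMMAS AND PROOFS =====

/-- triangular number, as used throughout the proofs -/
def TrI (j : Int) : Int := j * (j + 1) / 2

lemma Tr_succ (j : Int) : TrI (j + 1) = TrI j + (j + 1) := by
  have h2 : (2 : Int) ∣ j * (j + 1) := Int.even_mul_succ_self j |>.two_dvd
  have h : (j + 1) * (j + 1 + 1) = j * (j + 1) + 2 * (j + 1) := by ring
  unfold TrI; rw [h]; omega

lemma Tr_zero : TrI 0 = 0 := by decide

lemma fd_eq (r : Int) : PySem.Int.floordiv (r * (r + 1)) 2 = TrI r := by
  rw [PySem.Int.floordiv_eq_ediv_of_pos (by omega : (0:Int) < 2)]; rfl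

/-- inner loop of A's second family: entries TrI j + i -/
lemma innerL (i : Int) (k : Nat) : ∀ (a b : Int) (acc : List Int), b = a + k →
    ((PySem.List.pyRange a b 1).foldl
      (fun (p : List Int × Int) j => (p.1 ++ [p.2], p.2 + j + 1)) (acc, TrI a + i)).1
    = acc ++ (PySem.List.pyRange a b 1).map (fun j => TrI j + i) := by
  induction k with
  | zero => intro a b acc hb; rw [PySem.List.pyRange_one_eq_nil (by omega)]; simp
  | succ k ih =>
    intro a b acc hb
    rw [PySem.List.pyRange_one_cons (by omega)]
    simp only [List.foldl_cons, List.map_cons]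
    have hs : TrI a + i + a + 1 = TrI (a + 1) + i := by rw [Tr_succ]; ring
    rw [hs, ih (a + 1) b (acc ++ [TrI a + i]) (by omega)]
    simp

/-- inner loop of A's third family: entries TrI j + j - i -/
lemma innerR (i : Int) (k : Nat) : ∀ (a b : Int) (acc : List Int), b = a + k →
    ((PySem.List.pyRange a b 1).foldl
      (fun (p : List Int × Int) j => (p.1 ++ [p.2], p.2 + j + 2)) (acc, TrI a + a - i)).1
    = acc ++ (PySem.List.pyRange a b 1).map (fun j => TrI j + j - i) := by
  induction k with
  | zero => intro a b acc hb; rw [PySem.List.pyRange_one_eq_nil (by omega)]; simp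
  | succ k ih =>
    intro a b acc hb
    rw [PySem.List.pyRange_one_cons (by omega)]
    simp only [List.foldl_cons, List.map_cons]
    have hs : TrI a + a - i + a + 2 = TrI (a + 1) + (a + 1) - i := by rw [Tr_succ]; ring
    rw [hs, ih (a + 1) b (acc ++ [TrI a + a - i]) (by omega)]
    simp

/-- A's first loop produces the rows of the triangular grid -/
lemma rowsA (k : Nat) : ∀ (a b : Int) (acc : List (List Int)), b = a + k →
    ((PySem.List.pyRange a b 1).foldl
      (fun (st : List (List Int) × Int) i =>
        (st.1 ++ [PySem.List.pyRange st.2 (st.2 + i + 1) 1], st.2 + i + 1)) (acc, TrI a)).1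
    = acc ++ (PySem.List.pyRange a b 1).map (fun i => PySem.List.pyRange (TrI i) (TrI i + i + 1) 1) := by
  induction k with
  | zero => intro a b acc hb; rw [PySem.List.pyRange_one_eq_nil (by omega)]; simp
  | succ k ih =>
    intro a b acc hb
    rw [PySem.List.pyRange_one_cons (by omega)]
    simp only [List.foldl_cons, List.map_cons]
    have hs : TrI a + a + 1 = TrI (a + 1) := by rw [Tr_succ]; ring
    rw [hs, ih (a + 1) b _ (by omega)]
    simp

/-- A's second loop: left diagonals -/
lemma outerL (n : Int) (k : Nat) : ∀ (a b : Int) (acc : List (List Int)), b = a + k → b ≤ n →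
    ((PySem.List.pyRange a b 1).foldl
      (fun (st : List (List Int) × Int) i =>
        (st.1 ++ [((PySem.List.pyRange i n 1).foldl
            (fun (p : List Int × Int) j => (p.1 ++ [p.2], p.2 + j + 1)) ([], st.2 + i + 1)).1],
          st.2 + i + 1)) (acc, TrI a - 1)).1
    = acc ++ (PySem.List.pyRange a b 1).map
        (fun i => (PySem.List.pyRange i n 1).map (fun j => TrI j + i)) := by
  induction k with
  | zero => intro a b acc hb hn; rw [PySem.List.pyRange_one_eq_nil (by omega)]; simp
  | succ k ih =>
    intro a b acc hb hn
    rw [PySem.List.pyRange_one_cons (by omega)]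
    simp only [List.foldl_cons, List.map_cons]
    have hd : TrI a - 1 + a + 1 = TrI a + a := by ring
    have hIL := innerL a ((n - a).toNat) a n [] (by omega)
    have hd2 : TrI a + a = TrI (a + 1) - 1 := by rw [Tr_succ]; ring
    rw [hd, hIL, hd2, ih (a + 1) b _ (by omega) hn]
    simp

/-- A's third loop: right (anti-)diagonals -/
lemma outerR (n : Int) (k : Nat) : ∀ (a b : Int) (acc : List (List Int)), b = a + k → b ≤ n →
    ((PySem.List.pyRange a b 1).foldl
      (fun (st : List (List Int) × Int) i =>
        (st.1 ++ [((PySem.List.pyRange i n 1).foldl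
            (fun (p : List Int × Int) j => (p.1 ++ [p.2], p.2 + j + 2)) ([], st.2 + i)).1],
          st.2 + i)) (acc, TrI a - a)).1
    = acc ++ (PySem.List.pyRange a b 1).map
        (fun i => (PySem.List.pyRange i n 1).map (fun j => TrI j + j - i)) := by
  induction k with
  | zero => intro a b acc hb hn; rw [PySem.List.pyRange_one_eq_nil (by omega)]; simp
  | succ k ih =>
    intro a b acc hb hn
    rw [PySem.List.pyRange_one_cons (by omega)]
    simp only [List.foldl_cons, List.map_cons]
    have hd : TrI a - a + a = TrI a + a - a := by ring
    have hd2 : TrI a + a - a = TrI (a + 1) - (a + 1) := by rw [Tr_succ]; ring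
    rw [hd, innerR a (n - a).toNat a n [] (by omega), hd2, ih (a + 1) b _ (by omega) hn]
    simp

/-- B's grid in closed form -/
lemma gridB (n : Int) :
    ((PySem.List.pyRange 0 n 1).foldl
      (fun (g : List (List Int)) r =>
        let start := PySem.Int.floordiv (r * (r + 1)) 2
        g ++ [PySem.List.pyRange start (start + r + 1) 1]) [])
    = (PySem.List.pyRange 0 n 1).map (fun i => PySem.List.pyRange (TrI i) (TrI i + i + 1) 1) := by
  rw [PySem.List.foldl_append_singleton_eq_map]
  simp only [fd_eq, List.nil_append]

/-- reading an entry from the grid: grid[r][c] = TrI r + c -/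
lemma grid_entry (n r c : Int) (hr0 : 0 ≤ r) (hrn : r < n) (hc0 : 0 ≤ c) (hcr : c ≤ r) :
    PySem.List.pyGetD
      (PySem.List.pyGetD
        ((PySem.List.pyRange 0 n 1).map (fun i => PySem.List.pyRange (TrI i) (TrI i + i + 1) 1)) r [])
      c 0 = TrI r + c := by
  rw [PySem.List.pyGetD_map_pyRange_of_nonneg _ n r _ hr0 hrn]
  have hlen : (PySem.List.pyRange (TrI r) (TrI r + r + 1) 1).length = (r + 1).toNat := by
    rw [PySem.List.length_pyRange_one]; congr 1; omega
  rw [PySem.List.pyGetD_eq_getElem _ 0 hc0 (by rw [hlen]; omega),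
      PySem.List.getElem_pyRange_one]
  omega

-- ===== VERDICT (by name: the statement is the Claim_ definition above) =====
theorem triangle_py_spec : Claim_equal_triangle_py := by
  intro n _
  unfold Spec_triangle_py triangle_py triangle_py_alt
  by_cases hn : 0 < n
  · simp only []
    rw [gridB n]
    have hR := rowsA n.toNat 0 n [] (by omega)
    rw [Tr_zero] at hR
    have hL := fun acc => outerL n (n - 1).toNat 0 (n - 1) acc (by omega) (by omega)
    have hRt := fun acc => outerR n (n - 1).toNat 0 (n - 1) acc (by omega) (by omega)
    simp only [Tr_zero] at hL hRt
    norm_num at hL hRt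
    rw [hR, hL, hRt]
    rw [PySem.List.foldl_append_singleton_eq_map, PySem.List.foldl_append_singleton_eq_map]
    simp only [List.nil_append, List.append_assoc]
    congr 1
    congr 1
    · -- left diagonals
      apply List.map_congr_left
      intro c hc
      rw [PySem.List.mem_pyRange_one] at hc
      apply List.map_congr_left
      intro r hr
      rw [PySem.List.mem_pyRange_one] at hr
      rw [grid_entry n r c (by omega) (by omega) (by omega) (by omega)]
    · -- right diagonals
      apply List.map_congr_left
      intro d hd
      rw [PySem.List.mem_pyRange_one] at hd
      apply List.map_congr_left
      intro r hr
      rw [PySem.List.mem_pyRange_one] at hr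
      rw [grid_entry n r (r - d) (by omega) (by omega) (by omega) (by omega)]
      ring
  · -- n ≤ 0: every range is empty
    rw [PySem.List.pyRange_one_eq_nil (show n ≤ 0 by omega),
        PySem.List.pyRange_one_eq_nil (show n - 1 ≤ 0 by omega)]
    simp
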